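-- pv_equiv track=rewrite | github.com/cidgoh/nf-ncov-voc | bin/gvf2tsv.py | match_gvfs_to_who_variant
-- ===== SOURCE A (Python) =====
-- def match_gvfs_to_who_variant(pango_lineage_list, gvf_files_list):
--     matched_files = []
--     if len(pango_lineage_list) > 1:
--         for lineage in pango_lineage_list:
--             if "*" in lineage:
--                 lineage = lineage.replace("*", "")
--             matched_files.extend([i for i in gvf_files_list if
--                                   i.startswith(lineage)])
--
--             matched_files = sorted(set(matched_files))
--     else:
--         for lineage in pango_lineage_list:
--         #    matched_files.extend([i for i in gvf_files_list if
--         #                          i.startswith(lineage)])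
--             matched_files = ([i for i in gvf_files_list if
--                             i[:i.find("_")]==lineage])
--
--     return matched_files
-- ===== SOURCE B (Python) =====
-- def match_gvfs_to_who_variant(pango_lineage_list, gvf_files_list):
--     if len(pango_lineage_list) > 1:
--         # one pass over the files, one final sort (A re-sorts per lineage)
--         matched = set()
--         for f in gvf_files_list:
--             if any(f.startswith(lin.replace("*", ""))
--                    for lin in pango_lineage_list):
--                 matched.add(f)
--         return sorted(matched)
--     if not pango_lineage_list:
--         return []
--     # single lineage: group files by their '_'-prefix once, then one lookup
--     groups = {}
--     for f in gvf_files_list: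
--         groups.setdefault(f[:f.find("_")], []).append(f)
--     return groups.get(pango_lineage_list[0], [])
-- ===== Notes on version B (the rewrite author's own statement) =====
-- stated objective: faster
-- what changed: B inverts the loop nest: one pass over the files testing any() lineage prefix into a set with a single final sort (A re-sorts the whole accumulator once per lineage), and for a single lineage builds a prefix->files dict once and does one lookup instead of a filtering scan.
import Mathlib
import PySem

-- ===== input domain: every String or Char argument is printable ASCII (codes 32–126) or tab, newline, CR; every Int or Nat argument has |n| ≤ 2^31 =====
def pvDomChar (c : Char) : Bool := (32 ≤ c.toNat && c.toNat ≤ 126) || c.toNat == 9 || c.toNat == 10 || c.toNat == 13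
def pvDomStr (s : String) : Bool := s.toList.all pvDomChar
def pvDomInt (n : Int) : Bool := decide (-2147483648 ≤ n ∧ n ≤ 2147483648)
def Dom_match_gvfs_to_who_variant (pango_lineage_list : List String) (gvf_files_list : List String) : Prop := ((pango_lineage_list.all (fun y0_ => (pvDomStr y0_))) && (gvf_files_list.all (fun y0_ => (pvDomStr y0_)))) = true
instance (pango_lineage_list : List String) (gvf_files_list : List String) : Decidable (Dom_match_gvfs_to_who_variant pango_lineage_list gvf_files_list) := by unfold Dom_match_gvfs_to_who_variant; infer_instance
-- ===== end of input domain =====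

-- B does one pass over the files with a set built once and a single final sort (multi-lineage),
-- and a prefix-grouping dict with one lookup (single lineage), instead of A's per-lineage scans
-- with a re-sort of the whole accumulator on every iteration.

-- ===== PORT A =====
def match_gvfs_to_who_variant (pango_lineage_list : List String) (gvf_files_list : List String) : List String :=
  let matched_files : List String := []
  if 1 < pango_lineage_list.length then
    pango_lineage_list.foldl (fun matched_files lineage =>
      let lineage := if PySem.Str.isIn "*" lineage then PySem.Str.replace lineage "*" "" else lineage
      let matched_files := matched_files ++ gvf_files_list.filter (fun i => PySem.Str.startswith i lineage)
      PySem.List.sorted (PySem.Set.ofList matched_files) (fun x => x) false) matched_files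
  else
    pango_lineage_list.foldl (fun _ lineage =>
      gvf_files_list.filter (fun i => PySem.Str.slice i none (some (PySem.Str.find i "_")) == lineage)) matched_files

-- ===== PORT B =====
def match_gvfs_to_who_variant_alt (pango_lineage_list : List String) (gvf_files_list : List String) : List String :=
  if 1 < pango_lineage_list.length then
    let matched : PySem.Set String := gvf_files_list.foldl (fun s f =>
      if pango_lineage_list.any (fun lin => PySem.Str.startswith f (PySem.Str.replace lin "*" "")) then
        PySem.Set.add s f else s) PySem.Set.empty
    PySem.List.sorted matched (fun x => x) false
  else
    match pango_lineage_list with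
    | [] => []
    | lin :: _ =>
      let groups : PySem.Dict String (List String) := gvf_files_list.foldl (fun d f =>
        d.modify (PySem.Str.slice f none (some (PySem.Str.find f "_"))) [] (fun v => v ++ [f])) PySem.Dict.empty
      groups.getD lin []

-- ===== PRECONDITION & SPEC =====
def Spec_match_gvfs_to_who_variant (pango_lineage_list : List String) (gvf_files_list : List String) (out : List String) : Prop := out = match_gvfs_to_who_variant_alt pango_lineage_list gvf_files_list
instance (pango_lineage_list : List String) (gvf_files_list : List String) (out : List String) : Decidable (Spec_match_gvfs_to_who_variant pango_lineage_list gvf_files_list out) := by unfold Spec_match_gvfs_to_who_variant; infer_instance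

-- ===== CLAIM (what is proved, stated in full; the proofs are below) =====
def Claim_equal_match_gvfs_to_who_variant : Prop := ∀ (pango_lineage_list : List String) (gvf_files_list : List String), Dom_match_gvfs_to_who_variant pango_lineage_list gvf_files_list → Spec_match_gvfs_to_who_variant pango_lineage_list gvf_files_list (match_gvfs_to_who_variant pango_lineage_list gvf_files_list)

-- ===== LEMMAS AND PROOFS =====

-- replace.go copies its input unchanged when the pattern is not an infix
theorem pvReplaceGo_of_not_infix (old new : List Char) (fuel : Nat) (l acc : List Char)
    (hlen : l.length ≤ fuel) (h : ¬ old <:+: l) :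
    PySem.Chars.replace.go old new fuel l acc = acc.reverse ++ l := by
  induction fuel generalizing l acc with
  | zero =>
    have : l = [] := by cases l <;> simp_all
    subst this
    simp [PySem.Chars.replace.go]
  | succ n ih =>
    cases l with
    | nil => simp [PySem.Chars.replace.go]
    | cons c t =>
      have hpre : old.isPrefixOf (c :: t) = false := by
        by_contra hc
        have : old.isPrefixOf (c :: t) = true := by revert hc; cases old.isPrefixOf (c :: t) <;> simp
        exact h (List.isPrefixOf_iff_prefix.mp this).isInfix
      rw [show PySem.Chars.replace.go old new (n+1) (c :: t) acc =
            (if old.isPrefixOf (c :: t) = true then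
              PySem.Chars.replace.go old new n (List.drop old.length (c :: t)) (new.reverse ++ acc)
            else PySem.Chars.replace.go old new n t (c :: acc)) from rfl]
      rw [hpre]
      simp only [Bool.false_eq_true, if_false]
      rw [ih t (c :: acc) (by simpa using hlen) (fun hin => h (hin.trans (List.suffix_cons c t).isInfix))]
      simp

theorem pvReplaceStar (s : String) (h : PySem.Str.isIn "*" s = false) :
    PySem.Str.replace s "*" "" = s := by
  have hinf : ¬ ("*".toList <:+: s.toList) := by
    intro hi
    have ht : PySem.Str.isIn "*" s = true := (PySem.Str.isIn_iff_infix "*" s).mpr hi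
    exact absurd (ht.symm.trans h) (by simp)
  apply String.toList_injective
  rw [PySem.Str.toList_replace]
  rw [show PySem.Chars.replace s.toList "*".toList "".toList =
        PySem.Chars.replace.go "*".toList "".toList s.toList.length s.toList [] from rfl]
  rw [pvReplaceGo_of_not_infix _ _ _ _ _ (le_refl _) hinf]
  simp

-- sorted(set(X)) depends only on the members of X
theorem pvSortedSetCongr (X Y : List String) (h : ∀ x, x ∈ X ↔ x ∈ Y) :
    PySem.List.sorted (PySem.Set.ofList X) (fun x => x) false
      = PySem.List.sorted (PySem.Set.ofList Y) (fun x => x) false := by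
  apply PySem.List.sorted_eq_sorted_of_perm _ _ _ (fun a b hab => hab)
  apply (List.perm_ext_iff_of_nodup (PySem.Set.nodup_ofList X) (PySem.Set.nodup_ofList Y)).mpr
  intro x
  simp only [PySem.Set.mem_ofList]
  exact h x

-- A's multi-lineage loop: extend + sorted(set(·)) per lineage equals one sorted set of all matches
theorem pvFoldA (F : List String) (L : List String) (init X : List String)
    (hinit : init = PySem.List.sorted (PySem.Set.ofList X) (fun x => x) false) :
    L.foldl (fun matched_files lineage =>
        PySem.List.sorted (PySem.Set.ofList (matched_files ++ F.filter (fun i =>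
          PySem.Str.startswith i
            (if PySem.Str.isIn "*" lineage then PySem.Str.replace lineage "*" "" else lineage)))) (fun x => x) false)
      init
      = PySem.List.sorted (PySem.Set.ofList
          (X ++ L.flatMap (fun lin => F.filter (fun i =>
            PySem.Str.startswith i (PySem.Str.replace lin "*" ""))))) (fun x => x) false := by
  induction L generalizing init X with
  | nil => simpa using hinit
  | cons lin L' ih =>
    subst hinit
    have hstrip : F.filter (fun i => PySem.Str.startswith i
          (if PySem.Str.isIn "*" lin then PySem.Str.replace lin "*" "" else lin))
        = F.filter (fun i => PySem.Str.startswith i (PySem.Str.replace lin "*" "")) := by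
      by_cases hc : PySem.Str.isIn "*" lin
      · rw [if_pos hc]
      · rw [if_neg hc, pvReplaceStar lin (by revert hc; cases PySem.Str.isIn "*" lin <;> simp)]
    have hi : PySem.List.sorted (PySem.Set.ofList
          ((PySem.List.sorted (PySem.Set.ofList X) (fun x => x) false) ++ F.filter (fun i =>
            PySem.Str.startswith i
              (if PySem.Str.isIn "*" lin then PySem.Str.replace lin "*" "" else lin)))) (fun x => x) false
        = PySem.List.sorted (PySem.Set.ofList
            (X ++ F.filter (fun i => PySem.Str.startswith i (PySem.Str.replace lin "*" "")))) (fun x => x) false := by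
      rw [hstrip]
      exact pvSortedSetCongr _ _ (by
        intro x
        simp [PySem.List.mem_sorted, PySem.Set.mem_ofList, List.mem_append])
    rw [List.foldl_cons]
    exact (ih _ _ hi).trans (pvSortedSetCongr _ _ (by
      intro x
      simp [List.mem_flatMap, List.mem_filter, List.mem_append]))

-- ===== VERDICT (by name: the statement is the Claim_ definition above) =====
theorem match_gvfs_to_who_variant_spec : Claim_equal_match_gvfs_to_who_variant := by
  intro L F _
  unfold Spec_match_gvfs_to_who_variant match_gvfs_to_who_variant match_gvfs_to_who_variant_alt
  by_cases h : 1 < L.length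
  · simp only [h, if_pos]
    have hA := pvFoldA F L [] [] rfl
    rw [List.nil_append] at hA
    rw [hA]
    rw [PySem.List.foldl_if_eq_foldl_filter
          (fun f => L.any (fun lin => PySem.Str.startswith f (PySem.Str.replace lin "*" "")))
          PySem.Set.add]
    rw [show (PySem.Set.empty : PySem.Set String) = ([] : List String) from rfl,
        ← PySem.Set.ofList_eq_foldl]
    exact pvSortedSetCongr _ _ (by
      intro x
      simp only [List.mem_flatMap, List.mem_filter, List.any_eq_true]
      tauto)
  · simp only [h, if_false]
    match L with
    | [] => rfl
    | [lin] =>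
      simp only [List.foldl_cons, List.foldl_nil]
      have hfold : (F.map (fun f => (PySem.Str.slice f none (some (PySem.Str.find f "_")), f))).foldl
            (fun (d : PySem.Dict String (List String)) p => d.modify p.1 [] (fun v => v ++ [p.2]))
            PySem.Dict.empty
          = F.foldl (fun (d : PySem.Dict String (List String)) f =>
              d.modify (PySem.Str.slice f none (some (PySem.Str.find f "_"))) [] (fun v => v ++ [f]))
              PySem.Dict.empty := List.foldl_map
      rw [← hfold]
      rw [PySem.Dict.getD_foldl_modify_append]
      simp [List.filter_map, List.map_map, Function.comp_def]
    | a :: b :: t => simp at h
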